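-- pv_equiv track=rewrite | github.com/mkgs210/Algoritms | maxim/4kraskal.py | vid
-- ===== SOURCE A (Python) =====
-- def vid(n, g): #new dict with edge of graph
--     d = {}
--     letters = [*'abcdefghijklmnopqrstuvwxyzABCDEFGHIJKLMNOPQRSTUVWXYZабвгдежзийклмнопрстуфхцчшщъыьэюяАБВГДЕЖЗИЙКЛМНОПРСТУФХЦШЩЪЫЬЭЮЯ'[:n]]
--     for i in range(n):
--         for j in range(n):
--             if g[i][j] == 0:
--                 continue
--             if letters[i]+letters[j] not in d:
--                 if letters[j]+letters[i] not in d: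
--                     d |= {letters[i]+letters[j]:g[i][j]}
--     return d
-- ===== SOURCE B (Python) =====
-- def vid(n, g):  # pick one orientation per unordered pair, then sort picks by row-major position
--     letters = 'abcdefghijklmnopqrstuvwxyzABCDEFGHIJKLMNOPQRSTUVWXYZабвгдежзийклмнопрстуфхцчшщъыьэюяАБВГДЕЖЗИЙКЛМНОПРСТУФХЦШЩЪЫЬЭЮЯ'[:n]
--     chosen = []
--     for i in range(n):
--         for j in range(i, n):
--             if g[i][j] != 0:
--                 chosen.append((i, j))
--             elif i != j and g[j][i] != 0:
--                 chosen.append((j, i))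
--     chosen.sort(key=lambda rc: rc[0] * n + rc[1])
--     return {letters[r] + letters[c]: g[r][c] for r, c in chosen}
-- ===== Notes on version B (the rewrite author's own statement) =====
-- stated objective: alternative
-- what changed: A scans all n^2 cells keeping a growing dict and testing both key orientations against it before each insert; B never tests membership: it visits each unordered pair once (triangular loop), locally picks that pair's orientation (upper cell if nonzero, else lower), then a separate sort-by-row-major-position stage restores A's insertion order before building the dict in one pass.
import Mathlib
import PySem

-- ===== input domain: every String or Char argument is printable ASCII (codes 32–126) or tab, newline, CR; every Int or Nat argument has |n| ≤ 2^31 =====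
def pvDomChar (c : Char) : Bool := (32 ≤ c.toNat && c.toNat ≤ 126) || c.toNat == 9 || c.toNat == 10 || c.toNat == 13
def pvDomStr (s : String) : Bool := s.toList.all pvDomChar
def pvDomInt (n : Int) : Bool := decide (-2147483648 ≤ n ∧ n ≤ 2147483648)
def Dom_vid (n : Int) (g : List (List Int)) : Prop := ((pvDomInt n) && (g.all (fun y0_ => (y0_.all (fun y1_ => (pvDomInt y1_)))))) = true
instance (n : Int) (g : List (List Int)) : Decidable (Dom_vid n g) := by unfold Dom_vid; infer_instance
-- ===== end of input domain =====

-- B drops A's per-cell dict-membership tests: it visits each unordered pair once, locally picks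
-- that pair's orientation, then sorts the picks by row-major position before building the dict.

-- ===== PORT A =====
-- the letter alphabet the Python module slices (shared literal)
def pvAlpha : List Char := "abcdefghijklmnopqrstuvwxyzABCDEFGHIJKLMNOPQRSTUVWXYZабвгдежзийклмнопрстуфхцчшщъыьэюяАБВГДЕЖЗИЙКЛМНОПРСТУФХЦШЩЪЫЬЭЮЯ".toList

-- g[i][j]  (total form; in range under Pre_vid's bounds clauses)
def pvVal (g : List (List Int)) (i j : Int) : Int :=
  PySem.List.pyGetD (PySem.List.pyGetD g i []) j 0

-- letters[i] + letters[j]  (total form; in range under Pre_vid's letter clause)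
def pvKey (letters : List Char) (i j : Int) : String :=
  String.ofList [PySem.List.pyGetD letters i ' ', PySem.List.pyGetD letters j ' ']

def vid (n : Int) (g : List (List Int)) : List (String × Int) :=
  let letters := PySem.List.slice pvAlpha none (some n)
  ((PySem.List.pyRange 0 n 1).foldl (fun (d : PySem.Dict String Int) i =>
    (PySem.List.pyRange 0 n 1).foldl (fun d j =>
      if pvVal g i j = 0 then d
      else if d.contains (pvKey letters i j) = false then
        if d.contains (pvKey letters j i) = false then
          d.insert (pvKey letters i j) (pvVal g i j)
        else d
      else d) d) PySem.Dict.empty).items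

-- ===== PORT B =====
def vid_alt (n : Int) (g : List (List Int)) : List (String × Int) :=
  let letters := PySem.List.slice pvAlpha none (some n)
  let chosen := (PySem.List.pyRange 0 n 1).foldl (fun (acc : List (Int × Int)) i =>
    (PySem.List.pyRange i n 1).foldl (fun acc j =>
      if pvVal g i j ≠ 0 then acc ++ [(i, j)]
      else if i ≠ j ∧ pvVal g j i ≠ 0 then acc ++ [(j, i)]
      else acc) acc) []
  let sortedC := PySem.List.sorted chosen (fun rc => rc.1 * n + rc.2) false
  (sortedC.foldl (fun (d : PySem.Dict String Int) rc =>
      d.insert (pvKey letters rc.1 rc.2) (pvVal g rc.1 rc.2)) PySem.Dict.empty).items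

-- ===== PRECONDITION & SPEC =====
-- Pre_vid is exactly where the Python A returns: every accessed g[i][j] exists (IndexError
-- otherwise), and every cell holding a nonzero value has both coordinates below the 115-letter
-- alphabet (there letters[i] or letters[j] raises IndexError).
def Pre_vid (n : Int) (g : List (List Int)) : Prop :=
  ((0:Int) < n → n ≤ (g.length : Int)) ∧
  (∀ row ∈ g.take n.toNat, n ≤ (row.length : Int)) ∧
  (∀ i ∈ PySem.List.pyRange 0 n 1, ∀ j ∈ PySem.List.pyRange 0 n 1,
      pvVal g i j ≠ 0 → i < 115 ∧ j < 115)
instance (n : Int) (g : List (List Int)) : Decidable (Pre_vid n g) := by unfold Pre_vid; infer_instance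

def pvWitness_vid : Int × List (List Int) := (3, [[0, 2, 0], [0, 0, 0], [-1, 5, 7]])

def Spec_vid (n : Int) (g : List (List Int)) (out : List (String × Int)) : Prop := out = vid_alt n g
instance (n : Int) (g : List (List Int)) (out : List (String × Int)) : Decidable (Spec_vid n g out) := by unfold Spec_vid; infer_instance

-- ===== CLAIM (what is proved, stated in full; the proofs are below) =====
def Claim_equal_vid : Prop := ∀ (n : Int) (g : List (List Int)), Dom_vid n g → Pre_vid n g → Spec_vid n g (vid n g)

-- ===== LEMMAS AND PROOFS =====

-- row-major order on cells
def pvRM (p q : Int × Int) : Prop := p.1 < q.1 ∨ (p.1 = q.1 ∧ p.2 < q.2)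

-- the row-major list of cells A's loops traverse
def pvCells (n : Int) : List (Int × Int) :=
  (PySem.List.pyRange 0 n 1).flatMap (fun i => (PySem.List.pyRange 0 n 1).map (fun j => (i, j)))

-- the triangular list of index pairs B's loops traverse
def pvTri (n : Int) : List (Int × Int) :=
  (PySem.List.pyRange 0 n 1).flatMap (fun i => (PySem.List.pyRange i n 1).map (fun j => (i, j)))

-- B's per-pair orientation choice
def pvChoose (g : List (List Int)) (p : Int × Int) : Option (Int × Int) :=
  if pvVal g p.1 p.2 ≠ 0 then some (p.1, p.2)
  else if p.1 ≠ p.2 ∧ pvVal g p.2 p.1 ≠ 0 then some (p.2, p.1)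
  else none

-- the cells A inserts at, in A's (row-major) insertion order
def pvSel (n : Int) (g : List (List Int)) : List (Int × Int) :=
  (pvCells n).filter (fun p => decide (pvVal g p.1 p.2 ≠ 0 ∧ (p.1 ≤ p.2 ∨ pvVal g p.2 p.1 = 0)))

-- the items of A's dict over a cell list
def pvItems (g : List (List Int)) (letters : List Char) (cs : List (Int × Int)) : List (String × Int) :=
  cs.filterMap (fun p =>
    if pvVal g p.1 p.2 ≠ 0 ∧ (p.1 ≤ p.2 ∨ pvVal g p.2 p.1 = 0)
    then some (pvKey letters p.1 p.2, pvVal g p.1 p.2) else none)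

-- A's loop body, on one cell
def pvStepA (g : List (List Int)) (letters : List Char) (d : PySem.Dict String Int) (p : Int × Int) : PySem.Dict String Int :=
  if pvVal g p.1 p.2 = 0 then d
  else if d.contains (pvKey letters p.1 p.2) = false then
    if d.contains (pvKey letters p.2 p.1) = false then
      d.insert (pvKey letters p.1 p.2) (pvVal g p.1 p.2)
    else d
  else d

set_option maxRecDepth 10000 in
lemma pvAlpha_nodup : pvAlpha.Nodup := by decide
set_option maxRecDepth 10000 in
lemma pvAlpha_len : pvAlpha.length = 115 := by decide
lemma mem_pvCells {n : Int} {p : Int × Int} :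
    p ∈ pvCells n ↔ (0 ≤ p.1 ∧ p.1 < n) ∧ (0 ≤ p.2 ∧ p.2 < n) := by
  obtain ⟨a, b⟩ := p
  simp [pvCells, List.mem_flatMap, PySem.List.mem_pyRange_one]
lemma mem_pvTri {n : Int} {p : Int × Int} :
    p ∈ pvTri n ↔ (0 ≤ p.1 ∧ p.1 < n) ∧ (p.1 ≤ p.2 ∧ p.2 < n) := by
  obtain ⟨a, b⟩ := p
  simp only [pvTri, List.mem_flatMap, List.mem_map, PySem.List.mem_pyRange_one, Prod.mk.injEq]
  constructor
  · rintro ⟨i, hi, j, hj, rfl, rfl⟩; exact ⟨hi, hj⟩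
  · rintro ⟨hi, hj⟩; exact ⟨a, hi, b, hj, rfl, rfl⟩
lemma grid_pairwise (outer : List Int) (inner : Int → List Int) (ho : outer.Pairwise (· < ·))
    (hi : ∀ i, (inner i).Pairwise (· < ·)) :
    (outer.flatMap (fun i => (inner i).map (fun j => (i, j)))).Pairwise pvRM := by
  induction outer with
  | nil => simp
  | cons a t ih =>
    rw [List.pairwise_cons] at ho
    simp only [List.flatMap_cons]
    apply List.pairwise_append.2
    refine ⟨?_, ih ho.2, ?_⟩
    · exact List.pairwise_map.2 ((hi a).imp (fun h => Or.inr ⟨rfl, h⟩))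
    · intro x hx y hy
      simp only [List.mem_map] at hx
      simp only [List.mem_flatMap, List.mem_map] at hy
      obtain ⟨j, _, rfl⟩ := hx
      obtain ⟨b, hb, j', _, rfl⟩ := hy
      exact Or.inl (ho.1 b hb)
lemma pvCells_pairwise (n : Int) : (pvCells n).Pairwise pvRM :=
  grid_pairwise _ _ (PySem.List.pairwise_lt_pyRange_one 0 n) (fun _ => PySem.List.pairwise_lt_pyRange_one 0 n)
lemma pvTri_pairwise (n : Int) : (pvTri n).Pairwise pvRM :=
  grid_pairwise _ _ (PySem.List.pairwise_lt_pyRange_one 0 n) (fun i => PySem.List.pairwise_lt_pyRange_one i n)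
lemma pvGet_letters {n x : Int} (h0 : 0 ≤ x) (hn : x < n) (h115 : x < 115) :
    ∃ (hx : x.toNat < pvAlpha.length),
      PySem.List.pyGetD (PySem.List.slice pvAlpha none (some n)) x ' ' = pvAlpha[x.toNat] := by
  have hn0 : (0:Int) ≤ n := le_of_lt (lt_of_le_of_lt h0 hn)
  have hx : x.toNat < pvAlpha.length := by rw [pvAlpha_len]; omega
  refine ⟨hx, ?_⟩
  rw [PySem.List.slice_to pvAlpha hn0]
  have hlen : x < ((pvAlpha.take n.toNat).length : Int) := by
    rw [List.length_take]; rw [pvAlpha_len]; omega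
  rw [PySem.List.pyGetD_eq_getElem _ _ h0 hlen]
  exact List.getElem_take
lemma pvKey_inj' {n : Int} {x y a b : Int}
    (hx : 0 ≤ x ∧ x < n) (hy : 0 ≤ y ∧ y < n) (ha : 0 ≤ a ∧ a < n) (hb : 0 ≤ b ∧ b < n)
    (hx5 : x < 115) (hy5 : y < 115) (ha5 : a < 115) (hb5 : b < 115)
    (h : pvKey (PySem.List.slice pvAlpha none (some n)) x y
       = pvKey (PySem.List.slice pvAlpha none (some n)) a b) :
    x = a ∧ y = b := by
  obtain ⟨hxl, ex⟩ := pvGet_letters hx.1 hx.2 hx5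
  obtain ⟨hyl, ey⟩ := pvGet_letters hy.1 hy.2 hy5
  obtain ⟨hal, ea⟩ := pvGet_letters ha.1 ha.2 ha5
  obtain ⟨hbl, eb⟩ := pvGet_letters hb.1 hb.2 hb5
  unfold pvKey at h
  rw [ex, ey, ea, eb] at h
  have h2 : ([pvAlpha[x.toNat], pvAlpha[y.toNat]] : List Char) = [pvAlpha[a.toNat], pvAlpha[b.toNat]] := by
    have := congrArg String.toList h
    simpa using this
  simp only [List.cons.injEq, and_true] at h2
  have e1 := (pvAlpha_nodup.getElem_inj_iff).1 h2.1
  have e2 := (pvAlpha_nodup.getElem_inj_iff).1 h2.2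
  omega

-- Pre's letter bound, restated over plain inequalities
lemma pvBounds {n : Int} {g : List (List Int)} (hP : Pre_vid n g) {x y : Int}
    (hx : 0 ≤ x ∧ x < n) (hy : 0 ≤ y ∧ y < n) (hv : pvVal g x y ≠ 0) : x < 115 ∧ y < 115 :=
  hP.2.2 x (PySem.List.mem_pyRange_one.2 ⟨hx.1, hx.2⟩) y (PySem.List.mem_pyRange_one.2 ⟨hy.1, hy.2⟩) hv

-- key membership in A's items over a prefix of cells
lemma pvMemKeys {n : Int} {g : List (List Int)} (hP : Pre_vid n g)
    {ps rest : List (Int × Int)} {c : Int × Int} (hsplit : pvCells n = ps ++ c :: rest)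
    {a b : Int} (hab : (a, b) ∈ pvCells n) (habv : pvVal g a b ≠ 0) :
    pvKey (PySem.List.slice pvAlpha none (some n)) a b
        ∈ (pvItems g (PySem.List.slice pvAlpha none (some n)) ps).map Prod.fst
      ↔ ((a, b) ∈ ps ∧ (a ≤ b ∨ pvVal g b a = 0)) := by
  have habB := mem_pvCells.1 hab
  have h5 := pvBounds hP habB.1 habB.2 habv
  constructor
  · rintro hmem
    simp only [pvItems, List.map_filterMap, List.mem_filterMap] at hmem
    obtain ⟨⟨x, y⟩, hxy_mem, hxy⟩ := hmem
    by_cases hch : pvVal g x y ≠ 0 ∧ (x ≤ y ∨ pvVal g y x = 0)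
    · rw [if_pos hch] at hxy
      simp only [Option.map_some, Option.some.injEq] at hxy
      have hxyC : (x, y) ∈ pvCells n := by rw [hsplit]; exact List.mem_append_left _ hxy_mem
      have hxyB := mem_pvCells.1 hxyC
      have hxy5 := pvBounds hP hxyB.1 hxyB.2 hch.1
      have hkey : pvKey (PySem.List.slice pvAlpha none (some n)) x y
          = pvKey (PySem.List.slice pvAlpha none (some n)) a b := by
        simpa using hxy
      obtain ⟨rfl, rfl⟩ := pvKey_inj' hxyB.1 hxyB.2 habB.1 habB.2 hxy5.1 hxy5.2 h5.1 h5.2 hkey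
      exact ⟨hxy_mem, hch.2⟩
    · simp [hch] at hxy
  · rintro ⟨hps, hor⟩
    simp only [pvItems, List.map_filterMap, List.mem_filterMap]
    refine ⟨(a, b), hps, ?_⟩
    simp [habv, hor]

lemma pvNotMemPs {n : Int} {ps rest : List (Int × Int)} {c : Int × Int}
    (hsplit : pvCells n = ps ++ c :: rest) : c ∉ ps := by
  intro hc
  have pw := pvCells_pairwise n
  rw [hsplit] at pw
  have := (List.pairwise_append.1 pw).2.2 c hc c (List.mem_cons_self)
  simp [pvRM] at this

lemma pvMemPsRev {n : Int} {ps rest : List (Int × Int)} {i j : Int}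
    (hsplit : pvCells n = ps ++ (i, j) :: rest) (hmem : (j, i) ∈ pvCells n) :
    ((j, i) ∈ ps ↔ j < i) := by
  have pw := pvCells_pairwise n
  rw [hsplit] at pw
  obtain ⟨-, pw2, cross⟩ := List.pairwise_append.1 pw
  constructor
  · intro hps
    have := cross _ hps _ (List.mem_cons_self)
    simp [pvRM] at this
    omega
  · intro hlt
    rw [hsplit] at hmem
    rcases List.mem_append.1 hmem with h | h
    · exact h
    · rcases List.mem_cons.1 h with h | h
      · exfalso; injection h with h1 h2; omega
      · exfalso
        have := (List.pairwise_cons.1 pw2).1 _ h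
        simp [pvRM] at this
        omega

lemma pvFold_main {n : Int} {g : List (List Int)} (hP : Pre_vid n g) :
    ∀ (cs ps : List (Int × Int)) (d : PySem.Dict String Int),
      pvCells n = ps ++ cs →
      d.items = pvItems g (PySem.List.slice pvAlpha none (some n)) ps →
      (cs.foldl (pvStepA g (PySem.List.slice pvAlpha none (some n))) d).items
        = pvItems g (PySem.List.slice pvAlpha none (some n)) ps
          ++ pvItems g (PySem.List.slice pvAlpha none (some n)) cs := by
  intro cs
  induction cs with
  | nil =>
    intro ps d hsplit hd
    rw [List.foldl_nil, show pvItems g (PySem.List.slice pvAlpha none (some n)) ([] : List (Int × Int)) = [] from rfl, List.append_nil]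
    exact hd
  | cons c cs ih =>
    intro ps d hsplit hd
    obtain ⟨i, j⟩ := c
    have hmemc : (i, j) ∈ pvCells n := by
      rw [hsplit]; exact List.mem_append_right _ (List.mem_cons_self)
    have hB := mem_pvCells.1 hmemc
    have hstep : (pvStepA g (PySem.List.slice pvAlpha none (some n)) d (i, j)).items
        = d.items ++ pvItems g (PySem.List.slice pvAlpha none (some n)) [(i, j)] := by
      by_cases hv : pvVal g i j = 0
      · simp [pvStepA, pvItems, hv]
      · -- membership facts
        have hcontains_ij : d.contains (pvKey (PySem.List.slice pvAlpha none (some n)) i j) = false := by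
          rw [← Bool.not_eq_true, PySem.Dict.contains_iff_mem_keys]
          simp only [PySem.Dict.keys, hd]
          rw [show (pvItems g (PySem.List.slice pvAlpha none (some n)) ps).map (fun p => p.1)
              = (pvItems g (PySem.List.slice pvAlpha none (some n)) ps).map Prod.fst from rfl]
          rw [pvMemKeys hP hsplit hmemc hv]
          rintro ⟨hps, -⟩
          exact pvNotMemPs hsplit hps
        have hmemji : (j, i) ∈ pvCells n := by
          rw [mem_pvCells]; exact ⟨hB.2, hB.1⟩
        have hcontains_ji : d.contains (pvKey (PySem.List.slice pvAlpha none (some n)) j i)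
            = decide (j < i ∧ pvVal g j i ≠ 0) := by
          by_cases hcase : j < i ∧ pvVal g j i ≠ 0
          · have h1 : decide (j < i ∧ pvVal g j i ≠ 0) = true := by simpa using hcase
            rw [h1, PySem.Dict.contains_iff_mem_keys]
            simp only [PySem.Dict.keys, hd]
            rw [show (pvItems g (PySem.List.slice pvAlpha none (some n)) ps).map (fun p => p.1)
                = (pvItems g (PySem.List.slice pvAlpha none (some n)) ps).map Prod.fst from rfl]
            rw [pvMemKeys hP hsplit hmemji hcase.2]
            exact ⟨(pvMemPsRev hsplit hmemji).2 hcase.1, Or.inl (le_of_lt hcase.1)⟩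
          · have h1 : decide (j < i ∧ pvVal g j i ≠ 0) = false := by simpa using hcase
            rw [h1, ← Bool.not_eq_true, PySem.Dict.contains_iff_mem_keys]
            simp only [PySem.Dict.keys, hd]
            by_cases hvji : pvVal g j i = 0
            · -- no item can carry this key: any chosen cell has nonzero value
              rw [show (pvItems g (PySem.List.slice pvAlpha none (some n)) ps).map (fun p => p.1)
                  = (pvItems g (PySem.List.slice pvAlpha none (some n)) ps).map Prod.fst from rfl]
              intro hmem
              simp only [pvItems, List.map_filterMap, List.mem_filterMap] at hmem
              obtain ⟨⟨x, y⟩, hxy_mem, hxy⟩ := hmem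
              by_cases hch : pvVal g x y ≠ 0 ∧ (x ≤ y ∨ pvVal g y x = 0)
              · rw [if_pos hch] at hxy
                simp only [Option.map_some, Option.some.injEq] at hxy
                have hxyC : (x, y) ∈ pvCells n := by rw [hsplit]; exact List.mem_append_left _ hxy_mem
                have hxyB := mem_pvCells.1 hxyC
                have hxy5 := pvBounds hP hxyB.1 hxyB.2 hch.1
                have hji5 := pvBounds hP hB.1 hB.2 hv
                obtain ⟨rfl, rfl⟩ := pvKey_inj' hxyB.1 hxyB.2 ⟨hB.2.1, hB.2.2⟩ ⟨hB.1.1, hB.1.2⟩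
                  hxy5.1 hxy5.2 hji5.2 hji5.1 (by simpa using hxy)
                exact hch.1 hvji
              · simp [hch] at hxy
            · rw [show (pvItems g (PySem.List.slice pvAlpha none (some n)) ps).map (fun p => p.1)
                  = (pvItems g (PySem.List.slice pvAlpha none (some n)) ps).map Prod.fst from rfl]
              rw [pvMemKeys hP hsplit hmemji hvji]
              rintro ⟨hps, -⟩
              have := (pvMemPsRev hsplit hmemji).1 hps
              exact hcase ⟨this, hvji⟩
        by_cases hcase : j < i ∧ pvVal g j i ≠ 0
        · simp [pvStepA, hv, hcontains_ij, hcontains_ji, hcase, pvItems]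

        · have hch : pvVal g i j ≠ 0 ∧ (i ≤ j ∨ pvVal g j i = 0) := by
            refine ⟨hv, ?_⟩
            by_cases hij : i ≤ j
            · exact Or.inl hij
            · right
              by_contra hvji
              exact hcase ⟨by omega, hvji⟩
          simp only [pvStepA, hv, if_false, hcontains_ij, hcontains_ji, hcase, decide_false,
            if_true]
          rw [PySem.Dict.items_insert_of_not_contains _ _ hcontains_ij]
          simp [pvItems, hch]
    have hd' : (pvStepA g (PySem.List.slice pvAlpha none (some n)) d (i, j)).items
        = pvItems g (PySem.List.slice pvAlpha none (some n)) (ps ++ [(i, j)]) := by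
      rw [hstep, hd]; simp only [pvItems, List.filterMap_append]
    rw [List.foldl_cons, ih (ps ++ [(i, j)]) _ (by simpa using hsplit) hd']
    simp only [pvItems, show ((i, j) :: cs) = [(i, j)] ++ cs from rfl, List.filterMap_append,
      List.append_assoc]

lemma pvA_eq_fold (n : Int) (g : List (List Int)) :
    vid n g = ((pvCells n).foldl
      (pvStepA g (PySem.List.slice pvAlpha none (some n))) PySem.Dict.empty).items := by
  unfold vid pvCells
  rw [List.foldl_flatMap]
  simp only [List.foldl_map]
  rfl

-- B's chosen list is the triangular filterMap of the per-pair choice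
lemma pvB_chosen_eq (n : Int) (g : List (List Int)) :
    ((PySem.List.pyRange 0 n 1).foldl (fun (acc : List (Int × Int)) i =>
      (PySem.List.pyRange i n 1).foldl (fun acc j =>
        if pvVal g i j ≠ 0 then acc ++ [(i, j)]
        else if i ≠ j ∧ pvVal g j i ≠ 0 then acc ++ [(j, i)]
        else acc) acc) [])
    = (pvTri n).filterMap (pvChoose g) := by
  have inner : ∀ (i : Int) (acc : List (Int × Int)),
      (PySem.List.pyRange i n 1).foldl (fun acc j =>
        if pvVal g i j ≠ 0 then acc ++ [(i, j)]
        else if i ≠ j ∧ pvVal g j i ≠ 0 then acc ++ [(j, i)]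
        else acc) acc
      = acc ++ (PySem.List.pyRange i n 1).flatMap (fun j => ((pvChoose g (i, j)).toList)) := by
    intro i acc
    rw [show (fun (acc : List (Int × Int)) j =>
        if pvVal g i j ≠ 0 then acc ++ [(i, j)]
        else if i ≠ j ∧ pvVal g j i ≠ 0 then acc ++ [(j, i)]
        else acc)
      = (fun acc j => acc ++ (pvChoose g (i, j)).toList) from ?_]
    · exact PySem.List.foldl_append_eq_flatMap _ _ _
    · funext acc j
      simp only [pvChoose]
      split_ifs <;> simp
  have outer : ((PySem.List.pyRange 0 n 1).foldl (fun (acc : List (Int × Int)) i =>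
      (PySem.List.pyRange i n 1).foldl (fun acc j =>
        if pvVal g i j ≠ 0 then acc ++ [(i, j)]
        else if i ≠ j ∧ pvVal g j i ≠ 0 then acc ++ [(j, i)]
        else acc) acc) [])
      = [] ++ (PySem.List.pyRange 0 n 1).flatMap
          (fun i => (PySem.List.pyRange i n 1).flatMap (fun j => (pvChoose g (i, j)).toList)) := by
    rw [show (fun (acc : List (Int × Int)) i =>
        (PySem.List.pyRange i n 1).foldl (fun acc j =>
          if pvVal g i j ≠ 0 then acc ++ [(i, j)]
          else if i ≠ j ∧ pvVal g j i ≠ 0 then acc ++ [(j, i)]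
          else acc) acc)
      = (fun acc i => acc ++ (PySem.List.pyRange i n 1).flatMap (fun j => (pvChoose g (i, j)).toList)) from ?_]
    · exact PySem.List.foldl_append_eq_flatMap _ _ _
    · funext acc i; exact inner i acc
  rw [outer, List.nil_append, pvTri]
  rw [List.filterMap_flatMap]
  congr 1
  funext i
  rw [List.filterMap_map]
  induction (PySem.List.pyRange i n 1) with
  | nil => rfl
  | cons a t ih =>
    simp only [List.flatMap_cons, List.filterMap_cons, Function.comp]
    cases h : pvChoose g (i, a) with
    | none => simpa [h] using ih
    | some c => simpa [h] using ih

-- what a chosen cell looks like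
lemma pvChoose_cases {g : List (List Int)} {p c : Int × Int} (h : pvChoose g p = some c) :
    (c = p ∧ pvVal g p.1 p.2 ≠ 0) ∨ (c = (p.2, p.1) ∧ p.1 ≠ p.2 ∧ pvVal g p.1 p.2 = 0 ∧ pvVal g p.2 p.1 ≠ 0) := by
  unfold pvChoose at h
  by_cases h1 : pvVal g p.1 p.2 ≠ 0
  · rw [if_pos h1] at h; left; exact ⟨(Option.some.inj h).symm, h1⟩
  · rw [if_neg h1] at h
    by_cases h2 : p.1 ≠ p.2 ∧ pvVal g p.2 p.1 ≠ 0
    · rw [if_pos h2] at h; right; exact ⟨(Option.some.inj h).symm, h2.1, by omega, h2.2⟩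
    · rw [if_neg h2] at h; exact absurd h (by simp)

-- the chosen list has no duplicate cells
lemma pvChosen_nodup (n : Int) (g : List (List Int)) :
    ((pvTri n).filterMap (pvChoose g)).Nodup := by
  rw [List.Nodup, List.pairwise_filterMap]
  have pw := List.Pairwise.and_mem.1 (pvTri_pairwise n)
  refine pw.imp ?_
  rintro ⟨a, b⟩ ⟨x, y⟩ ⟨hp, hq, hrm⟩ c hc d hd he
  have hpT := mem_pvTri.1 hp
  have hqT := mem_pvTri.1 hq
  simp only [pvRM] at hrm
  simp only at hpT hqT
  subst he
  rcases pvChoose_cases hc with ⟨he1, -⟩ | ⟨he1, -⟩ <;>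
    rcases pvChoose_cases hd with ⟨he2, -⟩ | ⟨he2, -⟩ <;>
    rw [he1] at he2 <;> simp only [Prod.mk.injEq] at he2 <;> omega

-- membership in the chosen list = membership in A's selected cells
lemma pvChosen_mem (n : Int) (g : List (List Int)) (c : Int × Int) :
    c ∈ (pvTri n).filterMap (pvChoose g) ↔ c ∈ pvSel n g := by
  obtain ⟨x, y⟩ := c
  simp only [List.mem_filterMap, pvSel, List.mem_filter, mem_pvCells, decide_eq_true_eq]
  constructor
  · rintro ⟨⟨a, b⟩, hp, hc⟩
    have hpT := mem_pvTri.1 hp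
    simp only at hpT
    rcases pvChoose_cases hc with ⟨he, hv⟩ | ⟨he, hne, hz, hv⟩ <;>
      simp only [Prod.mk.injEq] at he <;> obtain ⟨rfl, rfl⟩ := he <;>
      simp only at hv ⊢
    · exact ⟨⟨⟨hpT.1.1, hpT.1.2⟩, ⟨by omega, hpT.2.2⟩⟩, hv, Or.inl hpT.2.1⟩
    · exact ⟨⟨⟨by omega, hpT.2.2⟩, ⟨hpT.1.1, by omega⟩⟩, by simpa using hv, Or.inr (by simpa using hz)⟩
  · rintro ⟨⟨hx, hy⟩, hv, hor⟩
    by_cases hxy : x ≤ y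
    · refine ⟨(x, y), mem_pvTri.2 ⟨hx, hxy, hy.2⟩, ?_⟩
      simp [pvChoose, hv]
    · refine ⟨(y, x), mem_pvTri.2 ⟨⟨hy.1, by omega⟩, by omega, hx.2⟩, ?_⟩
      have hz : pvVal g y x = 0 := by
        rcases hor with h | h
        · omega
        · exact h
      simp only [pvChoose]
      rw [if_neg (by simpa using hz), if_pos ⟨by omega, hv⟩]

-- the selected cells are strictly increasing under the row-major position key
lemma pvSel_pairwise_key (n : Int) (g : List (List Int)) :
    (pvSel n g).Pairwise (fun p q : Int × Int => p.1 * n + p.2 < q.1 * n + q.2) := by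
  have pw : (pvCells n).Pairwise (fun p q : Int × Int => p.1 * n + p.2 < q.1 * n + q.2) := by
    have := List.Pairwise.and_mem.1 (pvCells_pairwise n)
    refine this.imp ?_
    rintro ⟨a, b⟩ ⟨x, y⟩ ⟨hp, hq, hrm⟩
    have h1 := mem_pvCells.1 hp
    have h2 := mem_pvCells.1 hq
    simp only [pvRM] at hrm
    simp only at h1 h2 ⊢
    rcases hrm with h | ⟨rfl, h⟩
    · nlinarith [h1.2.1, h1.2.2, h2.2.1, h2.2.2]
    · omega
  exact pw.sublist List.filter_sublist

lemma pvSel_nodup (n : Int) (g : List (List Int)) : (pvSel n g).Nodup := by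
  have : (pvCells n).Nodup := by
    rw [List.Nodup]
    refine (pvCells_pairwise n).imp ?_
    rintro ⟨a, b⟩ ⟨x, y⟩ h he
    simp only [Prod.mk.injEq] at he
    simp only [pvRM] at h
    omega
  exact List.Nodup.sublist List.filter_sublist this

-- B's sorted chosen list is exactly A's selection order
lemma pvSorted_eq (n : Int) (g : List (List Int)) :
    PySem.List.sorted ((pvTri n).filterMap (pvChoose g)) (fun rc : Int × Int => rc.1 * n + rc.2) false
      = pvSel n g := by
  apply PySem.List.sorted_eq_of_perm_of_pairwise_lt
  · exact (List.perm_ext_iff_of_nodup (pvSel_nodup n g) (pvChosen_nodup n g)).2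
      (fun c => (pvChosen_mem n g c).symm)
  · exact pvSel_pairwise_key n g

-- mapping the selected cells to items gives pvItems of all cells
lemma pvSel_map_items (n : Int) (g : List (List Int)) (letters : List Char) :
    (pvSel n g).map (fun p => (pvKey letters p.1 p.2, pvVal g p.1 p.2))
      = pvItems g letters (pvCells n) := by
  rw [pvSel, pvItems]
  induction (pvCells n) with
  | nil => rfl
  | cons c t ih =>
    rw [List.filter_cons, List.filterMap_cons]
    by_cases h : pvVal g c.1 c.2 ≠ 0 ∧ (c.1 ≤ c.2 ∨ pvVal g c.2 c.1 = 0)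
    · rw [if_pos (by simpa using h), if_pos h, List.map_cons, ih]
    · rw [if_neg (by simpa using h), if_neg h, ih]

lemma pvKeysNodup {n : Int} {g : List (List Int)} (hP : Pre_vid n g) :
    ((pvItems g (PySem.List.slice pvAlpha none (some n)) (pvCells n)).map Prod.fst).Nodup := by
  rw [List.Nodup, List.pairwise_map]
  rw [pvItems, List.pairwise_filterMap]
  have pw := (List.Pairwise.and_mem.1 (pvCells_pairwise n))
  refine pw.imp ?_
  rintro ⟨x, y⟩ ⟨a, b⟩ ⟨hm1, hm2, hrm⟩ p hp q hq
  by_cases h1 : pvVal g x y ≠ 0 ∧ (x ≤ y ∨ pvVal g y x = 0)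
  · by_cases h2 : pvVal g a b ≠ 0 ∧ (a ≤ b ∨ pvVal g b a = 0)
    · rw [if_pos h1] at hp
      rw [if_pos h2] at hq
      obtain rfl := Option.some.inj hp
      obtain rfl := Option.some.inj hq
      intro hkey
      have hxyB := mem_pvCells.1 hm1
      have habB := mem_pvCells.1 hm2
      have h15 := pvBounds hP hxyB.1 hxyB.2 h1.1
      have h25 := pvBounds hP habB.1 habB.2 h2.1
      obtain ⟨rfl, rfl⟩ := pvKey_inj' hxyB.1 hxyB.2 habB.1 habB.2 h15.1 h15.2 h25.1 h25.2 hkey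
      simp [pvRM] at hrm
    · rw [if_neg h2] at hq; exact absurd hq (by simp)
  · rw [if_neg h1] at hp; exact absurd hp (by simp)

lemma pvB_eq_items (n : Int) (g : List (List Int)) :
    vid_alt n g = ((pvSel n g).foldl
      (fun (d : PySem.Dict String Int) rc =>
        d.insert (pvKey (PySem.List.slice pvAlpha none (some n)) rc.1 rc.2) (pvVal g rc.1 rc.2))
      PySem.Dict.empty).items := by
  unfold vid_alt
  simp only [pvB_chosen_eq, pvSorted_eq]

theorem pv_ab_eq (n : Int) (g : List (List Int)) (hP : Pre_vid n g) : vid n g = vid_alt n g := by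
  rw [pvA_eq_fold, pvB_eq_items]
  rw [pvFold_main hP (pvCells n) [] PySem.Dict.empty (by simp) rfl]
  rw [PySem.Dict.items_foldl_insert_fresh _
    (fun rc : Int × Int => pvKey (PySem.List.slice pvAlpha none (some n)) rc.1 rc.2)
    (fun rc : Int × Int => pvVal g rc.1 rc.2) PySem.Dict.empty
    (fun a _ => PySem.Dict.contains_empty _) ?keys]
  · rw [show ((PySem.Dict.empty : PySem.Dict String Int)).items = [] from rfl, List.nil_append]
    rw [show ((pvSel n g).map fun rc => (pvKey (PySem.List.slice pvAlpha none (some n)) rc.1 rc.2, pvVal g rc.1 rc.2))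
        = (pvSel n g).map (fun p => (pvKey (PySem.List.slice pvAlpha none (some n)) p.1 p.2, pvVal g p.1 p.2)) from rfl]
    rw [pvSel_map_items]
    simp [pvItems]
  case keys =>
    have := pvKeysNodup hP
    rw [← pvSel_map_items n g (PySem.List.slice pvAlpha none (some n))] at this
    simpa [List.map_map, Function.comp] using this

-- ===== VERDICT (by name: the statement is the Claim_ definition above) =====
theorem vid_spec : Claim_equal_vid := by
  unfold Claim_equal_vid Spec_vid
  exact fun n g _ hP => pv_ab_eq n g hP
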